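-- pv_equiv track=rewrite | github.com/shendytria/Jalur-Pengiriman-Barang | index.py | dfs
-- ===== SOURCE A (Python) =====
-- graph = {
--     "Gudang": ["Jl. Raya Darmo", "Jl. Mayjen Sungkono", "Jl. Arjuno"],
--     "Jl. Raya Darmo": ["Gudang", "Jl. Tunjungan", "Jl. Pemuda", "Jl. Kertajaya"],
--     "Jl. Mayjen Sungkono": ["Gudang", "Jl. Diponegoro", "Jl. Basuki Rahmat", "Jl. Walikota Mustajab"],
--     "Jl. Tunjungan": ["Jl. Raya Darmo", "Jl. Basuki Rahmat", "Jl. Embong Malang", "Jl. Ngagel"],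
--     "Jl. Pemuda": ["Jl. Raya Darmo", "Jl. Basuki Rahmat", "Jl. Walikota Mustajab"],
--     "Jl. Diponegoro": ["Jl. Mayjen Sungkono", "Jl. Basuki Rahmat", "Jl. Dr. Soetomo"],
--     "Jl. Basuki Rahmat": ["Jl. Tunjungan", "Jl. Pemuda", "Jl. Diponegoro", "Jl. Panglima Sudirman", "Jl. Dr. Soetomo"],
--     "Jl. Embong Malang": ["Jl. Tunjungan", "Jl. Panglima Sudirman", "Jl. Ngagel"],
--     "Jl. Panglima Sudirman": ["Jl. Basuki Rahmat", "Jl. Embong Malang", "Jl. Gubernur Suryo", "Jl. Simpang Dukuh"],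
--     "Jl. Gubernur Suryo": ["Jl. Panglima Sudirman", "Jl. Dr. Soetomo", "Jl. Dipatiukur", "Jl. Simpang Dukuh"],
--     "Jl. Kertajaya": ["Jl. Raya Darmo", "Jl. Ngagel", "Jl. Kusuma Bangsa"],
--     "Jl. Ngagel": ["Jl. Kertajaya", "Jl. Tunjungan", "Jl. Kusuma Bangsa", "Jl. Embong Malang"],
--     "Jl. Dr. Soetomo": ["Jl. Gubernur Suryo", "Jl. Dipatiukur", "Jl. Diponegoro", "Jl. Basuki Rahmat"],
--     "Jl. Walikota Mustajab": ["Jl. Pemuda", "Jl. Mayjen Sungkono"],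
--     "Jl. Kusuma Bangsa": ["Jl. Kertajaya", "Jl. Ngagel"],
--     "Jl. Arjuno": ["Gudang", "Jl. Dipatiukur"],
--     "Jl. Dipatiukur": ["Jl. Arjuno", "Jl. Gubernur Suryo", "Jl. Dr. Soetomo"],
--     "Jl. Simpang Dukuh": ["Jl. Panglima Sudirman", "Jl. Gubernur Suryo"]
-- }
--
-- def dfs(start, goal):
--     stack = [[start]]
--     visited = set()
--     while stack:
--         path = stack.pop()
--         node = path[-1]
--         if node == goal:
--             return path
--         if node not in visited:
--             visited.add(node)
--             for neighbor in graph.get(node, []):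
--                 if neighbor not in visited:
--                     new_path = path + [neighbor]
--                     stack.append(new_path)
--     return None
-- ===== SOURCE B (Python) =====
-- graph = {
--     "Gudang": ["Jl. Raya Darmo", "Jl. Mayjen Sungkono", "Jl. Arjuno"],
--     "Jl. Raya Darmo": ["Gudang", "Jl. Tunjungan", "Jl. Pemuda", "Jl. Kertajaya"],
--     "Jl. Mayjen Sungkono": ["Gudang", "Jl. Diponegoro", "Jl. Basuki Rahmat", "Jl. Walikota Mustajab"],
--     "Jl. Tunjungan": ["Jl. Raya Darmo", "Jl. Basuki Rahmat", "Jl. Embong Malang", "Jl. Ngagel"],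
--     "Jl. Pemuda": ["Jl. Raya Darmo", "Jl. Basuki Rahmat", "Jl. Walikota Mustajab"],
--     "Jl. Diponegoro": ["Jl. Mayjen Sungkono", "Jl. Basuki Rahmat", "Jl. Dr. Soetomo"],
--     "Jl. Basuki Rahmat": ["Jl. Tunjungan", "Jl. Pemuda", "Jl. Diponegoro", "Jl. Panglima Sudirman", "Jl. Dr. Soetomo"],
--     "Jl. Embong Malang": ["Jl. Tunjungan", "Jl. Panglima Sudirman", "Jl. Ngagel"],
--     "Jl. Panglima Sudirman": ["Jl. Basuki Rahmat", "Jl. Embong Malang", "Jl. Gubernur Suryo", "Jl. Simpang Dukuh"],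
--     "Jl. Gubernur Suryo": ["Jl. Panglima Sudirman", "Jl. Dr. Soetomo", "Jl. Dipatiukur", "Jl. Simpang Dukuh"],
--     "Jl. Kertajaya": ["Jl. Raya Darmo", "Jl. Ngagel", "Jl. Kusuma Bangsa"],
--     "Jl. Ngagel": ["Jl. Kertajaya", "Jl. Tunjungan", "Jl. Kusuma Bangsa", "Jl. Embong Malang"],
--     "Jl. Dr. Soetomo": ["Jl. Gubernur Suryo", "Jl. Dipatiukur", "Jl. Diponegoro", "Jl. Basuki Rahmat"],
--     "Jl. Walikota Mustajab": ["Jl. Pemuda", "Jl. Mayjen Sungkono"],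
--     "Jl. Kusuma Bangsa": ["Jl. Kertajaya", "Jl. Ngagel"],
--     "Jl. Arjuno": ["Gudang", "Jl. Dipatiukur"],
--     "Jl. Dipatiukur": ["Jl. Arjuno", "Jl. Gubernur Suryo", "Jl. Dr. Soetomo"],
--     "Jl. Simpang Dukuh": ["Jl. Panglima Sudirman", "Jl. Gubernur Suryo"]
-- }
--
-- def dfs(start, goal):
--     # Recursive backtracking DFS: a shared visited set and recursion on
--     # path + [neighbor], iterating neighbors in reversed order so that the
--     # first path found is the one the LIFO stack formulation finds.
--     visited = set()
--
--     def rec(path):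
--         node = path[-1]
--         if node == goal:
--             return path
--         if node in visited:
--             return None
--         visited.add(node)
--         for neighbor in reversed(graph.get(node, [])):
--             if neighbor not in visited:
--                 result = rec(path + [neighbor])
--                 if result is not None:
--                     return result
--         return None
--
--     return rec([start])
-- ===== Notes on version B (the rewrite author's own statement) =====
-- stated objective: alternative
-- what changed: Replaces the iterative DFS over an explicit stack of paths with a recursive backtracking DFS (inner rec helper, shared visited set, neighbors iterated in reversed order) that returns the first non-None recursive result.
import Mathlib
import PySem

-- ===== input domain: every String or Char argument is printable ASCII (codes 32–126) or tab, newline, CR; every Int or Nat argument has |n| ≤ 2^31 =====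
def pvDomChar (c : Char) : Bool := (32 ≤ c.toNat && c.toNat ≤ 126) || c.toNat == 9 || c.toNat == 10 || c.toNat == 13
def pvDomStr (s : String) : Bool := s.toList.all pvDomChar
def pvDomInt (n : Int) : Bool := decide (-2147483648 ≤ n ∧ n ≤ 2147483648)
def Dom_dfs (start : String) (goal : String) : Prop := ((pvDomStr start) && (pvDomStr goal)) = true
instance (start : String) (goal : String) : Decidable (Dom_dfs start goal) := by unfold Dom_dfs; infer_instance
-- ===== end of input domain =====

-- B re-implements the stack-of-paths DFS as a recursive backtracking DFS (shared
-- visited set, neighbors in reversed order): a different decomposition, same cost.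

-- the module-level graph, shared by both programs
def pvGraph : PySem.Dict String (List String) := PySem.Dict.ofList [
  ("Gudang", ["Jl. Raya Darmo", "Jl. Mayjen Sungkono", "Jl. Arjuno"]),
  ("Jl. Raya Darmo", ["Gudang", "Jl. Tunjungan", "Jl. Pemuda", "Jl. Kertajaya"]),
  ("Jl. Mayjen Sungkono", ["Gudang", "Jl. Diponegoro", "Jl. Basuki Rahmat", "Jl. Walikota Mustajab"]),
  ("Jl. Tunjungan", ["Jl. Raya Darmo", "Jl. Basuki Rahmat", "Jl. Embong Malang", "Jl. Ngagel"]),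
  ("Jl. Pemuda", ["Jl. Raya Darmo", "Jl. Basuki Rahmat", "Jl. Walikota Mustajab"]),
  ("Jl. Diponegoro", ["Jl. Mayjen Sungkono", "Jl. Basuki Rahmat", "Jl. Dr. Soetomo"]),
  ("Jl. Basuki Rahmat", ["Jl. Tunjungan", "Jl. Pemuda", "Jl. Diponegoro", "Jl. Panglima Sudirman", "Jl. Dr. Soetomo"]),
  ("Jl. Embong Malang", ["Jl. Tunjungan", "Jl. Panglima Sudirman", "Jl. Ngagel"]),
  ("Jl. Panglima Sudirman", ["Jl. Basuki Rahmat", "Jl. Embong Malang", "Jl. Gubernur Suryo", "Jl. Simpang Dukuh"]),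
  ("Jl. Gubernur Suryo", ["Jl. Panglima Sudirman", "Jl. Dr. Soetomo", "Jl. Dipatiukur", "Jl. Simpang Dukuh"]),
  ("Jl. Kertajaya", ["Jl. Raya Darmo", "Jl. Ngagel", "Jl. Kusuma Bangsa"]),
  ("Jl. Ngagel", ["Jl. Kertajaya", "Jl. Tunjungan", "Jl. Kusuma Bangsa", "Jl. Embong Malang"]),
  ("Jl. Dr. Soetomo", ["Jl. Gubernur Suryo", "Jl. Dipatiukur", "Jl. Diponegoro", "Jl. Basuki Rahmat"]),
  ("Jl. Walikota Mustajab", ["Jl. Pemuda", "Jl. Mayjen Sungkono"]),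
  ("Jl. Kusuma Bangsa", ["Jl. Kertajaya", "Jl. Ngagel"]),
  ("Jl. Arjuno", ["Gudang", "Jl. Dipatiukur"]),
  ("Jl. Dipatiukur", ["Jl. Arjuno", "Jl. Gubernur Suryo", "Jl. Dr. Soetomo"]),
  ("Jl. Simpang Dukuh", ["Jl. Panglima Sudirman", "Jl. Gubernur Suryo"])]

-- ===== PORT A =====
-- A's while loop over the explicit stack of paths; fuel only makes the loop total
-- (the loop pops at most 1 + Σ degrees ≤ 64 entries, so fuel 1000 is never exhausted).
def dfsLoop (goal : String) (fuel : Nat) (stack : List (List String)) (visited : PySem.Set String) :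
    Option (List String) :=
  match fuel with
  | 0 => none
  | fuel + 1 =>
    match PySem.List.pop? stack (-1) with          -- while stack: path = stack.pop()
    | none => none                                  -- stack empty: loop exits, return None
    | some (path, rest) =>
      match PySem.List.pyGet? path (-1) with        -- node = path[-1] (paths are never empty)
      | none => none
      | some node =>
        if node == goal then some path
        else if PySem.Set.contains visited node then dfsLoop goal fuel rest visited
        else
          let visited' := PySem.Set.add visited node
          let stack' := (pvGraph.getD node []).foldl
            (fun st n => if !PySem.Set.contains visited' n then st ++ [path ++ [n]] else st) rest
          dfsLoop goal fuel stack' visited'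

def dfs (start : String) (goal : String) : Option (List String) :=
  dfsLoop goal 1000 [[start]] PySem.Set.empty

-- ===== PORT B =====
-- B's recursive DFS: recGo = rec(path) (goal test, visited test, expand), recTry = the
-- for-loop over the reversed neighbor list; both thread the shared visited set.
-- Fuel bounds only the recursion DEPTH (≤ number of graph nodes + 1), never reached at 1000.
def recGo (goal : String) (fuel : Nat) (path : List String) (visited : PySem.Set String) :
    Option (List String) × PySem.Set String :=
  match fuel with
  | 0 => (none, visited)
  | fuel + 1 =>
    match PySem.List.pyGet? path (-1) with          -- node = path[-1]
    | none => (none, visited)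
    | some node =>
      if node == goal then (some path, visited)
      else if PySem.Set.contains visited node then (none, visited)
      else
        ((pvGraph.getD node []).reverse).foldl      -- for neighbor in reversed(...)
          (fun acc n =>
            match acc with
            | (some r, vis) => (some r, vis)        -- result already found: fall through
            | (none, vis) =>
              if PySem.Set.contains vis n then (none, vis)
              else recGo goal fuel (path ++ [n]) vis)
          (none, PySem.Set.add visited node)

def dfs_alt (start : String) (goal : String) : Option (List String) :=
  (recGo goal 1000 [start] PySem.Set.empty).1

-- ===== PRECONDITION & SPEC =====
def Spec_dfs (start : String) (goal : String) (out : Option (List String)) : Prop := out = dfs_alt start goal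
instance (start : String) (goal : String) (out : Option (List String)) : Decidable (Spec_dfs start goal out) := by unfold Spec_dfs; infer_instance

-- ===== CLAIM (what is proved, stated in full; the proofs are below) =====
def Claim_equal_dfs : Prop := ∀ (start : String) (goal : String), Dom_dfs start goal → Spec_dfs start goal (dfs start goal)

-- ===== LEMMAS AND PROOFS =====

-- the 18 node names (= the keys of pvGraph; every neighbor is again a key)
def pvKeys : List String := pvGraph.keys


-- every neighbor list stored in the graph consists of keys
theorem pv_values_keys : ∀ v ∈ pvGraph.values, ∀ x ∈ v, x ∈ pvKeys := by decide

theorem pv_getD_mem_keys {node x : String} (hx : x ∈ pvGraph.getD node []) : x ∈ pvKeys := by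
  rw [PySem.Dict.getD_eq_get?_getD] at hx
  cases hget : pvGraph.get? node with
  | none => rw [hget] at hx; simp at hx
  | some v =>
    rw [hget] at hx
    have hv : v ∈ pvGraph.values := by
      have := PySem.Dict.mem_items_of_get?_eq_some pvGraph hget
      exact List.mem_map_of_mem this
    exact pv_values_keys v hv x hx

theorem pv_getD_not_key {node : String} (h : node ∉ pvKeys) : pvGraph.getD node [] = [] := by
  have : pvGraph.get? node = none := by
    rw [PySem.Dict.get?_eq_none_iff_not_mem_keys]; exact h
  rw [PySem.Dict.getD_eq_get?_getD, this]; rfl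

-- ---- case start = goal ----
theorem dfsLoop_start_goal (g : String) (fuel : Nat) (vis : PySem.Set String) :
    dfsLoop g (fuel + 1) [[g]] vis = some [g] := by
  simp [dfsLoop, PySem.List.pop?, PySem.List.pyGet?, PySem.List.pyIdx?]

theorem recGo_start_goal (g : String) (fuel : Nat) (vis : PySem.Set String) :
    recGo g (fuel + 1) [g] vis = (some [g], vis) := by
  simp [recGo, PySem.List.pyGet?, PySem.List.pyIdx?]

-- ---- case start not a key, start ≠ goal: both searches stop after one step ----
theorem dfsLoop_nil (g : String) (fuel : Nat) (vis : PySem.Set String) :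
    dfsLoop g fuel [] vis = none := by
  cases fuel <;> simp [dfsLoop, PySem.List.pop?, PySem.List.pyIdx?]

theorem dfsLoop_not_key (s g : String) (hs : s ∉ pvKeys) (hne : s ≠ g)
    (fuel : Nat) (vis : PySem.Set String) : dfsLoop g (fuel + 1) [[s]] vis = none := by
  have hb : (s == g) = false := by simp [hne]
  simp only [dfsLoop, show PySem.List.pop? [[s]] (-1) = some ([s], []) from rfl,
    show PySem.List.pyGet? [s] (-1) = some s from rfl, hb, Bool.false_eq_true, if_false,
    pv_getD_not_key hs, List.foldl_nil]
  split <;> exact dfsLoop_nil g fuel _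

theorem dfs_not_key (s g : String) (hs : s ∉ pvKeys) (hne : s ≠ g) : dfs s g = none :=
  dfsLoop_not_key s g hs hne 999 PySem.Set.empty

theorem recGo_not_key (s g : String) (hs : s ∉ pvKeys) (hne : s ≠ g)
    (fuel : Nat) (vis : PySem.Set String) : (recGo g (fuel + 1) [s] vis).1 = none := by
  have hb : (s == g) = false := by simp [hne]
  simp only [recGo, show PySem.List.pyGet? [s] (-1) = some s from rfl, hb,
    Bool.false_eq_true, if_false, pv_getD_not_key hs, List.reverse_nil, List.foldl_nil]
  split <;> rfl

theorem dfs_alt_not_key (s g : String) (hs : s ∉ pvKeys) (hne : s ≠ g) : dfs_alt s g = none :=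
  recGo_not_key s g hs hne 999 PySem.Set.empty

-- ---- case goal not a key: neither search ever sees the goal ----
theorem dfsLoop_no_goal (g : String) (hg : g ∉ pvKeys) (fuel : Nat) :
    ∀ stack vis, (∀ p ∈ stack, ∃ n, p.getLast? = some n ∧ n ≠ g) →
      dfsLoop g fuel stack vis = none := by
  induction fuel with
  | zero => intro stack vis _; simp [dfsLoop]
  | succ fuel ih =>
    intro stack vis hinv
    rcases stack.eq_nil_or_concat with rfl | ⟨rest, path, rfl⟩
    · exact dfsLoop_nil g _ vis
    · rw [List.concat_eq_append] at hinv ⊢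
      obtain ⟨n, hlast, hng⟩ := hinv path (by simp)
      have hb : (n == g) = false := by simp [hng]
      have hrest : ∀ p ∈ rest, ∃ m, p.getLast? = some m ∧ m ≠ g := fun p hp =>
        hinv p (List.mem_append_left _ hp)
      simp only [dfsLoop, PySem.List.pop?_last, PySem.List.pyGet?_neg_one, hlast, hb,
        Bool.false_eq_true, if_false]
      cases hc : PySem.Set.contains vis n
      · simp only [Bool.false_eq_true, if_false]
        rw [PySem.List.foldl_append_if (fun m => !PySem.Set.contains (vis.add n) m)
              (fun m => path ++ [m])]
        apply ih
        intro p hp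
        rcases List.mem_append.mp hp with hp | hp
        · exact hrest p hp
        · obtain ⟨m, hm, rfl⟩ := List.mem_map.mp hp
          have hmk : m ∈ pvKeys := pv_getD_mem_keys (List.mem_of_mem_filter hm)
          exact ⟨m, by simp, fun h => hg (h ▸ hmk)⟩
      · simp only [if_true]
        exact ih rest vis hrest

theorem recTry_fold_none (g : String) (fuel : Nat) (path : List String)
    (ih : ∀ path vis, (∃ n, path.getLast? = some n ∧ n ≠ g) → (recGo g fuel path vis).1 = none) :
    ∀ (ns : List String), (∀ x ∈ ns, x ≠ g) → ∀ (acc : Option (List String) × PySem.Set String),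
      acc.1 = none →
      (ns.foldl (fun acc n =>
          match acc with
          | (some r, vis) => (some r, vis)
          | (none, vis) =>
            if PySem.Set.contains vis n then (none, vis)
            else recGo g fuel (path ++ [n]) vis) acc).1 = none := by
  intro ns
  induction ns with
  | nil => intro _ acc hacc; simpa using hacc
  | cons x ns' ihns =>
    intro hx acc hacc
    obtain ⟨v, rfl⟩ : ∃ v, acc = (none, v) := ⟨acc.2, by rw [← hacc]⟩
    rw [List.foldl_cons]
    apply ihns (fun y hy => hx y (List.mem_cons_of_mem _ hy))
    cases hc : PySem.Set.contains v x
    · simp only [hc, Bool.false_eq_true, if_false]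
      exact ih (path ++ [x]) v ⟨x, by simp, hx x List.mem_cons_self⟩
    · have hm : x ∈ v := (PySem.Set.contains_iff v x).mp hc
      simp [hm]

theorem recGo_no_goal (g : String) (hg : g ∉ pvKeys) (fuel : Nat) :
    ∀ path vis, (∃ n, path.getLast? = some n ∧ n ≠ g) → (recGo g fuel path vis).1 = none := by
  induction fuel with
  | zero => intro path vis _; simp [recGo]
  | succ fuel ih =>
    intro path vis ⟨n, hlast, hng⟩
    have hb : (n == g) = false := by simp [hng]
    simp only [recGo, PySem.List.pyGet?_neg_one, hlast, hb, Bool.false_eq_true, if_false]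
    cases hc : PySem.Set.contains vis n
    · simp only [Bool.false_eq_true, if_false]
      apply recTry_fold_none g fuel path ih
      · intro x hx
        have hxk : x ∈ pvGraph.getD n [] := List.mem_reverse.mp hx
        exact fun h => hg (h ▸ pv_getD_mem_keys hxk)
      · rfl
    · simp

-- ---- case start and goal both keys: a finite table, checked by the kernel ----
theorem pv_table : ∀ s ∈ pvKeys, ∀ g ∈ pvKeys, dfs s g = dfs_alt s g := by decide

-- ===== VERDICT (by name: the statement is the Claim_ definition above) =====
theorem dfs_spec : Claim_equal_dfs := by
  intro s g _
  unfold Spec_dfs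
  by_cases hsg : s = g
  · subst hsg
    show dfsLoop s 1000 [[s]] _ = (recGo s 1000 [s] _).1
    rw [show (1000 : Nat) = 999 + 1 from rfl, dfsLoop_start_goal, recGo_start_goal]
  · by_cases hs : s ∈ pvKeys
    · by_cases hgk : g ∈ pvKeys
      · exact pv_table s hs g hgk
      · have hstart : ∃ n, ([s] : List String).getLast? = some n ∧ n ≠ g :=
          ⟨s, rfl, fun h => hgk (h ▸ hs)⟩
        show dfsLoop g 1000 [[s]] _ = (recGo g 1000 [s] _).1
        rw [dfsLoop_no_goal g hgk 1000 [[s]] PySem.Set.empty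
              (by intro p hp; rw [List.mem_singleton] at hp; subst hp; exact hstart),
            recGo_no_goal g hgk 1000 [s] PySem.Set.empty hstart]
    · rw [dfs_not_key s g hs hsg, dfs_alt_not_key s g hs hsg]
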